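-- pv_equiv track=rewrite | github.com/ProfSynapse/Toolset-Training | enhance_batch_021.py | clean_assistant_content
-- ===== SOURCE A (Python) =====
-- def clean_assistant_content(assistant_content):
--     """Remove Result objects and keep only tool_call + arguments"""
--     lines = assistant_content.split('\n')
--     output_lines = []
--     in_result = False
--     found_arguments_end = False
--
--     for i, line in enumerate(lines):
--         if line.strip().startswith('Result:'):
--             in_result = True
--             continue
--
--         if in_result:
--             # Skip all lines that are part of Result object
--             if line.startswith('}') or (line.strip() == '' and i+1 < len(lines) and lines[i+1].strip().startswith('}')):
--                 in_result = False
--             continue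
--
--         if line.startswith('tool_call:') or line.startswith('arguments:'):
--             output_lines.append(line)
--             if line.startswith('arguments:'):
--                 found_arguments_end = False
--         else:
--             # Continue appending if we're in arguments JSON
--             if output_lines and output_lines[-1].startswith('arguments:'):
--                 output_lines.append(line)
--
--     return '\n'.join(output_lines).strip()
-- ===== SOURCE B (Python) =====
-- def clean_assistant_content(assistant_content):
--     """Remove Result objects and keep only tool_call + arguments"""
--     lines = assistant_content.split('\n')
--
--     # Pass 1: drop the Result blocks, keeping every other line.
--     filtered = []
--     skipping = False
--     for i, line in enumerate(lines):
--         if line.strip().startswith('Result:'):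
--             skipping = True
--         elif skipping:
--             if line.startswith('}') or (line.strip() == '' and i + 1 < len(lines)
--                                         and lines[i + 1].strip().startswith('}')):
--                 skipping = False
--         else:
--             filtered.append(line)
--
--     # Pass 2: keep tool_call:/arguments: lines and one continuation line after arguments:.
--     kept = []
--     after_args = False
--     for line in filtered:
--         if line.startswith('tool_call:') or line.startswith('arguments:'):
--             kept.append(line)
--             after_args = line.startswith('arguments:')
--         elif after_args:
--             kept.append(line)
--             after_args = False
--
--     return '\n'.join(kept).strip()
-- ===== Notes on version B (the rewrite author's own statement) =====
-- stated objective: simpler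
-- what changed: A's single fused loop is split into two passes: pass 1 strips Result blocks into a filtered list, pass 2 selects tool_call:/arguments: lines plus one continuation tracked by a boolean flag instead of re-inspecting the last kept line; the unused found_arguments_end variable is dropped.
import Mathlib
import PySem

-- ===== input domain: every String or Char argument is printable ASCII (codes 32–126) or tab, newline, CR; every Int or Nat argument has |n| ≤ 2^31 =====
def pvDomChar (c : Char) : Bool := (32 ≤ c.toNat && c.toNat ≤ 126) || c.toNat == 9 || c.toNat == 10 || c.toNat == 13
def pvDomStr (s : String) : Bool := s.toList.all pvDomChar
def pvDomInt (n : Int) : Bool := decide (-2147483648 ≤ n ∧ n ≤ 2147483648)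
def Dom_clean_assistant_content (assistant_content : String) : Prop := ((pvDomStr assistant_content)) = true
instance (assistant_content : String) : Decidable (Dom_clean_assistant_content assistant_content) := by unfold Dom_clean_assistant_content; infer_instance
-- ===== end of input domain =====

-- B replaces A's single fused loop by two passes (strip Result blocks, then select
-- tool_call:/arguments:+continuation lines via a boolean flag instead of inspecting
-- the last kept line); objective: simpler decomposition, same cost.

-- ===== PORT A =====
-- A's single loop: state (in_result, output_lines); lookahead lines[i+1] is the head of the rest.
def pvA_loop : List String → Bool → List String → List String
  | [], _, out => out
  | line :: rest, in_result, out =>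
    if PySem.Str.startswith (PySem.Str.strip line) "Result:" then
      pvA_loop rest true out
    else if in_result then
      if PySem.Str.startswith line "}" ||
         (PySem.Str.strip line == "" && PySem.Str.startswith (PySem.Str.strip (rest.head?.getD "")) "}") then
        pvA_loop rest false out
      else
        pvA_loop rest true out
    else if PySem.Str.startswith line "tool_call:" || PySem.Str.startswith line "arguments:" then
      pvA_loop rest in_result (out ++ [line])
    else if !out.isEmpty && PySem.Str.startswith (out.getLastD "") "arguments:" then
      pvA_loop rest in_result (out ++ [line])
    else
      pvA_loop rest in_result out

def clean_assistant_content (assistant_content : String) : String :=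
  PySem.Str.strip
    (PySem.Str.join "\n" (pvA_loop (((PySem.Str.split? assistant_content "\n").getD [])) false []))

-- ===== PORT B =====
-- Pass 1: drop the Result blocks, keep every other line.
def pvB_pass1 : List String → Bool → List String
  | [], _ => []
  | line :: rest, skipping =>
    if PySem.Str.startswith (PySem.Str.strip line) "Result:" then
      pvB_pass1 rest true
    else if skipping then
      if PySem.Str.startswith line "}" ||
         (PySem.Str.strip line == "" && PySem.Str.startswith (PySem.Str.strip (rest.head?.getD "")) "}") then
        pvB_pass1 rest false
      else
        pvB_pass1 rest true
    else
      line :: pvB_pass1 rest skipping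

-- Pass 2: keep tool_call:/arguments: lines and one continuation line after arguments:.
def pvB_pass2 : List String → Bool → List String
  | [], _ => []
  | line :: rest, after_args =>
    if PySem.Str.startswith line "tool_call:" || PySem.Str.startswith line "arguments:" then
      line :: pvB_pass2 rest (PySem.Str.startswith line "arguments:")
    else if after_args then
      line :: pvB_pass2 rest false
    else
      pvB_pass2 rest after_args

def clean_assistant_content_alt (assistant_content : String) : String :=
  PySem.Str.strip
    (PySem.Str.join "\n"
      (pvB_pass2 (pvB_pass1 (((PySem.Str.split? assistant_content "\n").getD [])) false) false))

-- ===== PRECONDITION & SPEC =====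
def Spec_clean_assistant_content (assistant_content : String) (out : String) : Prop := out = clean_assistant_content_alt assistant_content
instance (assistant_content : String) (out : String) : Decidable (Spec_clean_assistant_content assistant_content out) := by unfold Spec_clean_assistant_content; infer_instance

-- ===== CLAIM (what is proved, stated in full; the proofs are below) =====
def Claim_equal_clean_assistant_content : Prop := ∀ (assistant_content : String), Dom_clean_assistant_content assistant_content → Spec_clean_assistant_content assistant_content (clean_assistant_content assistant_content)

-- ===== LEMMAS AND PROOFS =====
-- A's "output_lines and output_lines[-1].startswith('arguments:')" test as a function of the accumulator.
def pvAflag (out : List String) : Bool :=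
  !out.isEmpty && PySem.Str.startswith (out.getLastD "") "arguments:"

theorem pvAflag_concat (out : List String) (l : String) :
    pvAflag (out ++ [l]) = PySem.Str.startswith l "arguments:" := by
  simp [pvAflag]

-- The fused loop equals pass 2 applied to pass 1's residue, relative to any accumulator.
theorem pvA_loop_eq (lines : List String) :
    ∀ (ir : Bool) (out : List String),
      pvA_loop lines ir out = out ++ pvB_pass2 (pvB_pass1 lines ir) (pvAflag out) := by
  induction lines with
  | nil => intro ir out; simp [pvA_loop, pvB_pass1, pvB_pass2]
  | cons line rest ih =>
    intro ir out
    by_cases hres : PySem.Str.startswith (PySem.Str.strip line) "Result:" = true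
    · simp only [pvA_loop, pvB_pass1, hres, if_true]
      exact ih true out
    · by_cases hir : ir = true
      · by_cases hend : (PySem.Str.startswith line "}" ||
            (PySem.Str.strip line == "" && PySem.Str.startswith (PySem.Str.strip (rest.head?.getD "")) "}")) = true
        · simp only [pvA_loop, pvB_pass1, hres, hir, Bool.false_eq_true, if_false, if_true]
          rw [if_pos hend, if_pos hend]
          exact ih false out
        · simp only [pvA_loop, pvB_pass1, hres, hir, Bool.false_eq_true, if_false, if_true]
          rw [if_neg hend, if_neg hend]
          exact ih true out
      · simp only [Bool.not_eq_true] at hir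
        by_cases hkeep : (PySem.Str.startswith line "tool_call:" ||
            PySem.Str.startswith line "arguments:") = true
        · simp only [pvA_loop, pvB_pass1, pvB_pass2, hres, hir, hkeep, if_false,
            Bool.false_eq_true, if_true]
          rw [ih false (out ++ [line]), pvAflag_concat]
          simp
        · simp only [Bool.or_eq_true, not_or, Bool.not_eq_true] at hkeep
          by_cases hfl : pvAflag out = true
          · have : (!out.isEmpty && PySem.Str.startswith (out.getLastD "") "arguments:") = true := hfl
            simp only [pvA_loop, pvB_pass1, pvB_pass2, hres, hir, hkeep.1, hkeep.2, hfl,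
              Bool.false_eq_true, if_false, if_true, this, Bool.or_self]
            rw [ih false (out ++ [line]), pvAflag_concat, hkeep.2]
            simp
          · simp only [Bool.not_eq_true] at hfl
            have : (!out.isEmpty && PySem.Str.startswith (out.getLastD "") "arguments:") = false := hfl
            simp only [pvA_loop, pvB_pass1, pvB_pass2, hres, hir, hkeep.1, hkeep.2, hfl,
              Bool.false_eq_true, if_false, this, Bool.or_self]
            rw [ih false out, hfl]

-- ===== VERDICT (by name: the statement is the Claim_ definition above) =====
theorem clean_assistant_content_spec : Claim_equal_clean_assistant_content := by
  intro s _
  unfold Spec_clean_assistant_content clean_assistant_content clean_assistant_content_alt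
  rw [pvA_loop_eq]
  rfl
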